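-- pv_equiv track=rewrite | github.com/emc255/python-algorithm-design | dynamic_programming/memoize/all_construct.py | all_construct_helper
-- ===== SOURCE A (Python) =====
-- def all_construct_helper(s: str, words: list, memoize: dict) -> list:
--     if s in memoize:
--         return memoize[s]
--
--     if len(s) == 0:
--         return [[]]
--
--     result = []
--     for word in words:
--         if s.startswith(word):
--             new_string = s[len(word):]
--             combinations = all_construct_helper(new_string, words, memoize)
--             result.extend([[word] + combination for combination in combinations])
--
--     memoize[s] = result
--     return result
-- ===== SOURCE B (Python) =====
-- # Bottom-up DP over suffixes instead of top-down recursion; return-value equivalent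
-- # (B only READS memoize and never writes it, unlike A which populates it).
-- def all_construct_helper(s: str, words: list, memoize: dict) -> list:
--     if s in memoize:
--         return memoize[s]
--     n = len(s)
--     dp = [None] * (n + 1)
--     for i in range(n, -1, -1):
--         suffix = s[i:]
--         if suffix in memoize:
--             dp[i] = memoize[suffix]
--         elif i == n:
--             dp[i] = [[]]
--         else:
--             res = []
--             for word in words:
--                 if word and suffix.startswith(word):
--                     res.extend([word] + comb for comb in dp[i + len(word)])
--             dp[i] = res
--     return dp[0]
-- ===== Notes on version B (the rewrite author's own statement) =====
-- stated objective: alternative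
-- what changed: Top-down memoized recursion over suffixes replaced by a bottom-up DP table built from the empty suffix upward; B only reads the memoize dict (same lookups), never writes it.
import Mathlib
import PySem

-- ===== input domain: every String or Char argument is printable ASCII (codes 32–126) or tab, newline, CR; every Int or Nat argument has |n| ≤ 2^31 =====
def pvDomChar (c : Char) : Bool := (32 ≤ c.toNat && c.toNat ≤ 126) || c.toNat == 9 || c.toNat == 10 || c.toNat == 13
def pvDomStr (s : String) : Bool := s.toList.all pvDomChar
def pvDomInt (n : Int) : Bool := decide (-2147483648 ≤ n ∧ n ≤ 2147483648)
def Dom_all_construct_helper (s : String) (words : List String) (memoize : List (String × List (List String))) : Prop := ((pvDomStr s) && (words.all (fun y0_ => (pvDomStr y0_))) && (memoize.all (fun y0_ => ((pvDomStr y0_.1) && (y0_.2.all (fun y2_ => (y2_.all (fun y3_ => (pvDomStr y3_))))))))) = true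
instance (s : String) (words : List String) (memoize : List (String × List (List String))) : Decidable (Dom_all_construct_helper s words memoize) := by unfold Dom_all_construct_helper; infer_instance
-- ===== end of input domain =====

-- B replaces A's top-down memoized recursion by a bottom-up DP table over the suffixes of s
-- (objective: alternative decomposition). Return-value equivalence only: A also WRITES results
-- into the memoize dict passed by the caller, B only reads it; that side effect is not modeled.

-- ===== PORT A =====
-- A's recursion, fueled (fuel = len(s)+1 suffices under Pre_); the dict is threaded through
-- the recursion exactly as Python's mutable memoize is: acGo is the function body, acLoop the
-- 'for word in words' loop (state = (result, memoize)). A appends only keys absent from the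
-- dict, so Dict.insert is exactly Python's memoize[s] = result.
mutual
def acGo (fuel : Nat) (s : String) (words : List String)
    (m : PySem.Dict String (List (List String))) :
    List (List String) × PySem.Dict String (List (List String)) :=
  match fuel with
  | 0 => ([], m)  -- fuel exhausted: unreachable when fuel > len(s) and "" ∉ words
  | fuel + 1 =>
    match m.get? s with
    | some v => (v, m)                                -- if s in memoize: return memoize[s]
    | none =>
      if PySem.Str.len s = 0 then ([[]], m)           -- if len(s) == 0: return [[]]
      else
        let p := acLoop fuel s words words ([], m)    -- result = []; for word in words: …
        (p.1, p.2.insert s p.1)                       -- memoize[s] = result; return result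
termination_by (fuel, 0)

def acLoop (fuel : Nat) (s : String) (words : List String) (ws : List String)
    (acc : List (List String) × PySem.Dict String (List (List String))) :
    List (List String) × PySem.Dict String (List (List String)) :=
  match ws with
  | [] => acc
  | word :: ws =>
    if PySem.Str.startswith s word then
      let new_string := PySem.Str.slice s (some (PySem.Str.len word)) none
      let cm := acGo fuel new_string words acc.2
      acLoop fuel s words ws (acc.1 ++ cm.1.map (fun combination => word :: combination), cm.2)
    else acLoop fuel s words ws acc
termination_by (fuel, ws.length + 1)
end

def all_construct_helper (s : String) (words : List String) (memoize : List (String × List (List String))) : List (List String) :=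
  (acGo (s.toList.length + 1) s words (PySem.Dict.mk memoize)).1

-- ===== PORT B =====
-- B's dp-row for one suffix: memoize hit, else combine words with the rows already computed
-- (tailDp = rows for the strictly shorter suffixes, nearest first; dp[i+len(word)] = tailDp[len(word)-1]).
def bRow (suffix : String) (words : List String)
    (d : PySem.Dict String (List (List String))) (tailDp : List (List (List String))) :
    List (List String) :=
  match d.get? suffix with
  | some v => v
  | none =>
    words.foldl (fun res word =>
      if word ≠ "" ∧ PySem.Str.startswith suffix word then
        res ++ (tailDp.getD (word.toList.length - 1) []).map (fun comb => word :: comb)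
      else res) []

-- dp table, built from the empty suffix upward: entry k is the row for the suffix dropping k chars.
def bDp (words : List String) (d : PySem.Dict String (List (List String))) :
    List Char → List (List (List String))
  | [] => [match d.get? "" with | some v => v | none => [[]]]
  | c :: rest =>
    let tailDp := bDp words d rest
    bRow (String.ofList (c :: rest)) words d tailDp :: tailDp

def all_construct_helper_alt (s : String) (words : List String) (memoize : List (String × List (List String))) : List (List String) :=
  match (PySem.Dict.mk memoize).get? s with
  | some v => v
  | none => (bDp words (PySem.Dict.mk memoize) s.toList).headD []

-- ===== PRECONDITION & SPEC =====
-- Pre_ excludes exactly the inputs on which A never returns (RecursionError): an empty word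
-- makes A recurse on s unchanged whenever s is nonempty and not already memoized.
def Pre_all_construct_helper (s : String) (words : List String) (memoize : List (String × List (List String))) : Prop :=
  "" ∈ words → (s = "" ∨ s ∈ memoize.map Prod.fst)
instance (s : String) (words : List String) (memoize : List (String × List (List String))) : Decidable (Pre_all_construct_helper s words memoize) := by unfold Pre_all_construct_helper; infer_instance

def pvWitness_all_construct_helper : String × List String × (List (String × List (List String))) :=
  ("abc", ["a", "b", "c", "ab"], [("z", [["z"]])])

def Spec_all_construct_helper (s : String) (words : List String) (memoize : List (String × List (List String))) (out : List (List String)) : Prop := out = all_construct_helper_alt s words memoize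
instance (s : String) (words : List String) (memoize : List (String × List (List String))) (out : List (List String)) : Decidable (Spec_all_construct_helper s words memoize out) := by unfold Spec_all_construct_helper; infer_instance

-- ===== CLAIM (what is proved, stated in full; the proofs are below) =====
def Claim_equal_all_construct_helper : Prop := ∀ (s : String) (words : List String) (memoize : List (String × List (List String))), Dom_all_construct_helper s words memoize → Pre_all_construct_helper s words memoize → Spec_all_construct_helper s words memoize (all_construct_helper s words memoize)

-- ===== LEMMAS AND PROOFS =====

-- B's value for the suffix l of s (head of the dp table for l).
def pvV (words : List String) (d : PySem.Dict String (List (List String))) (l : List Char) :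
    List (List String) := (bDp words d l).headD []

-- Invariant of the threaded memoize dict: every entry is either an original one or a cached pvV.
def pvInv (d0 m : PySem.Dict String (List (List String))) (words : List String) : Prop :=
  ∀ t : String, m.get? t = d0.get? t ∨ (d0.get? t = none ∧ m.get? t = some (pvV words d0 t.toList))

theorem pvV_of_get?_eq_some {words : List String} {d : PySem.Dict String (List (List String))}
    {s : String} {v : List (List String)} (h : d.get? s = some v) :
    pvV words d s.toList = v := by
  cases hl : s.toList with
  | nil =>
    have hs : s = "" := by
      have := congrArg String.ofList hl
      simpa [String.ofList_toList] using this
    subst hs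
    simp [pvV, bDp, h]
  | cons c rest =>
    have hs : String.ofList (c :: rest) = s := by
      rw [← hl, String.ofList_toList]
    simp [pvV, bDp, bRow, hs, h]

theorem pvV_nil_of_get?_eq_none {words : List String} {d : PySem.Dict String (List (List String))}
    (h : d.get? "" = none) : pvV words d [] = [[]] := by
  simp [pvV, bDp, h]

theorem bDp_getD (words : List String) (d : PySem.Dict String (List (List String)))
    (l : List Char) (k : Nat) (hk : k ≤ l.length) :
    (bDp words d l).getD k [] = pvV words d (l.drop k) := by
  induction l generalizing k with
  | nil =>
    have hk0 : k = 0 := by simpa using hk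
    subst hk0
    simp [bDp, pvV]
  | cons c rest ih =>
    cases k with
    | zero => simp [bDp, pvV]
    | succ k =>
      have hk' : k ≤ rest.length := by simpa using hk
      simpa [bDp] using ih k hk'

theorem pvInv_get?_none {d0 m : PySem.Dict String (List (List String))} {words : List String}
    {s : String} (hInv : pvInv d0 m words) (h : m.get? s = none) : d0.get? s = none := by
  rcases hInv s with h1 | ⟨h1, h2⟩
  · rw [← h1]; exact h
  · rw [h] at h2; exact absurd h2 (by simp)

-- Named unfolding equations for the mutual (fueled) recursion of port A.
theorem acLoop_nil (fuel : Nat) (s : String) (words : List String)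
    (acc : List (List String) × PySem.Dict String (List (List String))) :
    acLoop fuel s words [] acc = acc := by
  rw [acLoop]

theorem acLoop_cons (fuel : Nat) (s : String) (words : List String) (word : String)
    (ws : List String) (acc : List (List String) × PySem.Dict String (List (List String))) :
    acLoop fuel s words (word :: ws) acc =
      if PySem.Str.startswith s word then
        acLoop fuel s words ws
          (acc.1 ++ ((acGo fuel (PySem.Str.slice s (some (PySem.Str.len word)) none) words acc.2).1).map
            (fun combination => word :: combination),
           (acGo fuel (PySem.Str.slice s (some (PySem.Str.len word)) none) words acc.2).2)
      else acLoop fuel s words ws acc := by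
  rw [acLoop]

theorem acGo_cache (fuel : Nat) (s : String) (words : List String)
    (m : PySem.Dict String (List (List String))) (v : List (List String))
    (h : m.get? s = some v) : acGo (fuel + 1) s words m = (v, m) := by
  rw [acGo]
  simp only [h]

theorem acGo_nilStr (fuel : Nat) (s : String) (words : List String)
    (m : PySem.Dict String (List (List String)))
    (h : m.get? s = none) (h0 : PySem.Str.len s = 0) :
    acGo (fuel + 1) s words m = ([[]], m) := by
  rw [acGo]
  simp only [h]
  rw [if_pos h0]

theorem acGo_step (fuel : Nat) (s : String) (words : List String)
    (m : PySem.Dict String (List (List String)))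
    (h : m.get? s = none) (h0 : ¬ PySem.Str.len s = 0) :
    acGo (fuel + 1) s words m =
      ((acLoop fuel s words words ([], m)).1,
       (acLoop fuel s words words ([], m)).2.insert s (acLoop fuel s words words ([], m)).1) := by
  rw [acGo]
  simp only [h]
  rw [if_neg h0]

-- The loop lemma: assuming the induction hypothesis for acGo at the current fuel, A's word loop
-- computes exactly B's fold for this suffix while preserving the dict invariant.
theorem pvLoop_eq (words : List String) (d0 : PySem.Dict String (List (List String)))
    (hw : ∀ w ∈ words, w ≠ "") (fuel : Nat) (s : String)
    (hlen : s.toList.length ≤ fuel)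
    (IH : ∀ (t : String) (m : PySem.Dict String (List (List String))), t.toList.length < fuel →
      pvInv d0 m words →
      (acGo fuel t words m).1 = pvV words d0 t.toList ∧ pvInv d0 (acGo fuel t words m).2 words) :
    ∀ (ws : List String), (∀ w ∈ ws, w ∈ words) →
    ∀ (res : List (List String)) (m : PySem.Dict String (List (List String))), pvInv d0 m words →
      (acLoop fuel s words ws (res, m)).1 =
        ws.foldl (fun res word =>
          if word ≠ "" ∧ PySem.Str.startswith s word then
            res ++ ((bDp words d0 s.toList.tail).getD (word.toList.length - 1) []).map
              (fun comb => word :: comb)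
          else res) res ∧
      pvInv d0 (acLoop fuel s words ws (res, m)).2 words := by
  intro ws
  induction ws with
  | nil =>
    intro _ res m hInv
    rw [acLoop_nil]
    exact ⟨rfl, hInv⟩
  | cons word ws ihws =>
    intro hmem res m hInv
    have hword : word ∈ words := hmem word (by simp)
    have hne : word ≠ "" := hw word hword
    have hmem' : ∀ w ∈ ws, w ∈ words := fun w hw' => hmem w (by simp [hw'])
    rw [acLoop_cons, List.foldl_cons]
    by_cases hsw : PySem.Str.startswith s word = true
    · -- word matches: A recurses on the sliced string, B reads the dp row
      have hpre : word.toList <+: s.toList :=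
        (PySem.Chars.startswith_iff s.toList word.toList).mp
          (by simpa [PySem.Str.startswith_eq] using hsw)
      have hwlen : 1 ≤ word.toList.length := by
        rcases Nat.eq_zero_or_pos word.toList.length with h0 | h1
        · exfalso; apply hne
          have : word.toList = [] := List.length_eq_zero_iff.mp h0
          have := congrArg String.ofList this
          simpa [String.ofList_toList] using this
        · exact h1
      have hwle : word.toList.length ≤ s.toList.length := hpre.length_le
      have hslice : (PySem.Str.slice s (some (PySem.Str.len word)) none).toList =
          s.toList.drop word.toList.length := by
        rw [PySem.Str.toList_slice]
        have h0 : (0 : Int) ≤ PySem.Str.len word := by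
          simp [PySem.Str.len_eq]
        rw [PySem.Chars.slice_eq_listSlice, PySem.List.slice_from _ h0]
        simp [PySem.Str.len_eq]
      have hlt : (PySem.Str.slice s (some (PySem.Str.len word)) none).toList.length < fuel := by
        rw [hslice, List.length_drop]
        omega
      have hgo := IH (PySem.Str.slice s (some (PySem.Str.len word)) none) m hlt hInv
      have hdrop : (bDp words d0 s.toList.tail).getD (word.toList.length - 1) [] =
          pvV words d0 (s.toList.drop word.toList.length) := by
        rcases hl : s.toList with _ | ⟨c, rest⟩
        · rw [hl] at hwle
          simp only [List.length_nil] at hwle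
          omega
        · have hk : word.toList.length - 1 ≤ rest.length := by
            rw [hl] at hwle
            simp only [List.length_cons] at hwle
            omega
          have hd : (c :: rest).drop word.toList.length = rest.drop (word.toList.length - 1) := by
            conv_lhs => rw [show word.toList.length = (word.toList.length - 1) + 1 from by omega]
            rw [List.drop_succ_cons]
          rw [List.tail_cons, bDp_getD words d0 rest _ hk, hd]
      rw [if_pos hsw, if_pos ⟨hne, hsw⟩]
      have hstep := ihws hmem'
        (res ++ ((acGo fuel (PySem.Str.slice s (some (PySem.Str.len word)) none) words m).1).map
          (fun combination => word :: combination))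
        (acGo fuel (PySem.Str.slice s (some (PySem.Str.len word)) none) words m).2 hgo.2
      refine ⟨?_, hstep.2⟩
      rw [hstep.1]
      congr 2
      rw [hgo.1, hslice, hdrop]
    · -- word does not match: both sides skip it
      rw [if_neg hsw, if_neg (fun h => hsw h.2)]
      exact ihws hmem' res m hInv

-- The main invariant lemma: with enough fuel and no empty word, A's recursion returns B's dp
-- value for the current suffix and preserves the dict invariant.
theorem pvGo_eq (words : List String) (d0 : PySem.Dict String (List (List String)))
    (hw : ∀ w ∈ words, w ≠ "") :
    ∀ (fuel : Nat) (s : String) (m : PySem.Dict String (List (List String))),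
      s.toList.length < fuel → pvInv d0 m words →
      (acGo fuel s words m).1 = pvV words d0 s.toList ∧
      pvInv d0 (acGo fuel s words m).2 words := by
  intro fuel
  induction fuel with
  | zero => intro s m hlen; omega
  | succ fuel ihfuel =>
    intro s m hlen hInv
    cases hm : m.get? s with
    | some v =>
      -- cache hit: the invariant says the cached value is pvV
      rw [acGo_cache fuel s words m v hm]
      refine ⟨?_, hInv⟩
      rcases hInv s with h1 | ⟨_, h2⟩
      · have hd0v : d0.get? s = some v := by rw [← h1, hm]
        exact (pvV_of_get?_eq_some hd0v).symm
      · rw [hm] at h2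
        exact Option.some.inj h2
    | none =>
      have hd0 : d0.get? s = none := pvInv_get?_none hInv hm
      by_cases h0 : PySem.Str.len s = 0
      · -- empty suffix
        have hnil : s.toList = [] := by
          have : (s.toList.length : Int) = 0 := by simpa [PySem.Str.len_eq] using h0
          exact List.length_eq_zero_iff.mp (by exact_mod_cast this)
        have hs : s = "" := by
          have := congrArg String.ofList hnil
          simpa [String.ofList_toList] using this
        rw [acGo_nilStr fuel s words m hm h0]
        subst hs
        exact ⟨by rw [hnil, pvV_nil_of_get?_eq_none (by simpa using hd0)], hInv⟩
      · -- nonempty suffix: run the word loop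
        rw [acGo_step fuel s words m hm h0]
        have hlen' : s.toList.length ≤ fuel := by omega
        have hloop := pvLoop_eq words d0 hw fuel s hlen'
          (fun t m' hlt hInv' => ihfuel t m' hlt hInv') words (fun w h => h) [] m hInv
        have hrow : (acLoop fuel s words words ([], m)).1 = pvV words d0 s.toList := by
          rw [hloop.1]
          rcases hl : s.toList with _ | ⟨c, rest⟩
          · exfalso; apply h0; simp [PySem.Str.len_eq, hl]
          · have hs : String.ofList (c :: rest) = s := by
              rw [← hl, String.ofList_toList]
            simp only [pvV, bDp, bRow, hs, hd0, List.headD_cons]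
            simp [List.tail_cons]
        refine ⟨hrow, ?_⟩
        intro t
        by_cases ht : t = s
        · subst ht
          right
          refine ⟨hd0, ?_⟩
          rw [PySem.Dict.get?_insert]
          simp [hrow]
        · rw [PySem.Dict.get?_insert]
          simp only [if_neg ht]
          exact hloop.2 t

theorem pvPre_not_mem {s : String} {memoize : List (String × List (List String))}
    (h : (PySem.Dict.mk memoize).get? s = none) : s ∉ memoize.map Prod.fst := by
  intro hmem
  have : s ∈ (PySem.Dict.mk memoize).keys := by simpa using hmem
  rw [PySem.Dict.get?_eq_none_iff_not_mem_keys] at h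
  exact h this

-- ===== VERDICT (by name: the statement is the Claim_ definition above) =====
theorem all_construct_helper_spec : Claim_equal_all_construct_helper := by
  intro s words memoize _dom hpre
  unfold Spec_all_construct_helper all_construct_helper all_construct_helper_alt
  cases hd : (PySem.Dict.mk memoize).get? s with
  | some v => rw [acGo_cache _ s words _ v hd]
  | none =>
    by_cases hs : s = ""
    · subst hs
      rw [acGo_nilStr _ _ words _ hd (by simp [PySem.Str.len_eq])]
      simp [bDp, hd]
    · have hw : ∀ w ∈ words, w ≠ "" := by
        intro w hwmem hweq
        subst hweq
        rcases hpre hwmem with h | h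
        · exact hs h
        · exact pvPre_not_mem hd h
      have h0 : ¬ PySem.Str.len s = 0 := by
        intro h
        apply hs
        have hnil : s.toList = [] := by
          have : (s.toList.length : Int) = 0 := by simpa [PySem.Str.len_eq] using h
          exact List.length_eq_zero_iff.mp (by exact_mod_cast this)
        have := congrArg String.ofList hnil
        simpa [String.ofList_toList] using this
      have hInv : pvInv (PySem.Dict.mk memoize) (PySem.Dict.mk memoize) words :=
        fun t => Or.inl rfl
      have hgo := (pvGo_eq words (PySem.Dict.mk memoize) hw (s.toList.length + 1) s
        (PySem.Dict.mk memoize) (by omega) hInv).1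
      rw [hgo]
      rfl
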